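-- pv_equiv track=rewrite | github.com/jamerrq/Competitive-Programming | Vjudge/Palindromes.py | isMirrored
-- ===== SOURCE A (Python) =====
-- mirror = {
--     'A' : 'A',
--     'E' : '3',
--     'H' : 'H',
--     'I' : 'I',
--     'J' : 'L',
--     'L' : 'J',
--     'M' : 'M',
--     'O' : 'O',
--     'S' : '2',
--     'T' : 'T',
--     'U' : 'U',
--     'V' : 'V',
--     'W' : 'W',
--     'X' : 'X',
--     'Y' : 'Y',
--     'Z' : '5',
--     '1' : '1',
--     '2' : 'S',
--     '3' : 'E',
--     '5' : 'Z',
--     '8' : '8'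
-- }
--
-- def isMirrored(string):
--     i = 0
--     j = len(string) - 1
--     while i <= j:
--         if string[i] != mirror.get(string[j], ''):
--             return False
--
--         i += 1
--         j -= 1
--
--     return True
-- ===== SOURCE B (Python) =====
-- MIRROR = {
--     'A': 'A', 'E': '3', 'H': 'H', 'I': 'I', 'J': 'L', 'L': 'J', 'M': 'M',
--     'O': 'O', 'S': '2', 'T': 'T', 'U': 'U', 'V': 'V', 'W': 'W', 'X': 'X',
--     'Y': 'Y', 'Z': '5', '1': '1', '2': 'S', '3': 'E', '5': 'Z', '8': '8'
-- }
--
-- def isMirrored(string):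
--     image = ''.join(MIRROR.get(c, '') for c in string)
--     return image[::-1] == string
-- ===== Notes on version B (the rewrite author's own statement) =====
-- stated objective: alternative
-- what changed: Replaces A's inward two-pointer while loop with early exit by a staged computation: one forward pass builds the mirror image of the whole string (unmapped characters vanish via the '' default), then the image is reversed and compared to the input with a single whole-string equality.
import Mathlib
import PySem

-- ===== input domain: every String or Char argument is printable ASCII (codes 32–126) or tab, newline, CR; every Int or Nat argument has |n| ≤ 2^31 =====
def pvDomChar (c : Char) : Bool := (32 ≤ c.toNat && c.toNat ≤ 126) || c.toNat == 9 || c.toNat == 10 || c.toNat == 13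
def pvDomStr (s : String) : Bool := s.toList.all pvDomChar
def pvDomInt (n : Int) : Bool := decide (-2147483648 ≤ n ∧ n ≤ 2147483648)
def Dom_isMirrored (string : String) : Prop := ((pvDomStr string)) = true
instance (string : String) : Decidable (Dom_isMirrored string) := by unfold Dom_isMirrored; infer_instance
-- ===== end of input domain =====

-- B replaces A's inward two-pointer loop with a staged computation: build the mirror
-- image of the whole string forward, reverse it, and compare once (objective: alternative).

-- ===== PORT A =====
-- the module-level 'mirror' dict used by A
def pvMirror : PySem.Dict Char Char := PySem.Dict.mk
  [('A','A'),('E','3'),('H','H'),('I','I'),('J','L'),('L','J'),('M','M'),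
   ('O','O'),('S','2'),('T','T'),('U','U'),('V','V'),('W','W'),('X','X'),
   ('Y','Y'),('Z','5'),('1','1'),('2','S'),('3','E'),('5','Z'),('8','8')]

-- the while-loop of A; string[i] is modelled as Option Char (some = the 1-char string,
-- none = IndexError, unreachable from the entry call) and mirror.get(string[j], '') as
-- Option Char with none playing the role of ''
def pvLoopA (s : List Char) (i j : Int) : Bool :=
  if _h : i ≤ j then
    if PySem.List.pyGet? s i = (PySem.List.pyGet? s j).bind (fun c => pvMirror.get? c) then
      pvLoopA s (i + 1) (j - 1)
    else false
  else true
termination_by (j + 1 - i).toNat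
decreasing_by omega

def isMirrored (string : String) : Bool :=
  pvLoopA string.toList 0 (PySem.Str.len string - 1)

-- ===== PORT B =====
-- B's module constant MIRROR is a fixed literal table; its lookup MIRROR.get(c, '') is
-- ported exactly as this match (some = the 1-char string, none = the '' default)
def pvMir (c : Char) : Option Char :=
  match c with
  | 'A' => some 'A' | 'E' => some '3' | 'H' => some 'H' | 'I' => some 'I'
  | 'J' => some 'L' | 'L' => some 'J' | 'M' => some 'M' | 'O' => some 'O'
  | 'S' => some '2' | 'T' => some 'T' | 'U' => some 'U' | 'V' => some 'V'
  | 'W' => some 'W' | 'X' => some 'X' | 'Y' => some 'Y' | 'Z' => some '5'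
  | '1' => some '1' | '2' => some 'S' | '3' => some 'E' | '5' => some 'Z'
  | '8' => some '8' | _ => none

-- image = ''.join(MIRROR.get(c, '') for c in string); return image[::-1] == string
def isMirrored_alt (string : String) : Bool :=
  let image := string.toList.flatMap (fun c => (pvMir c).toList)
  decide (image.reverse = string.toList)

-- ===== PRECONDITION & SPEC =====
def Spec_isMirrored (string : String) (out : Bool) : Prop := out = isMirrored_alt string
instance (string : String) (out : Bool) : Decidable (Spec_isMirrored string out) := by unfold Spec_isMirrored; infer_instance

-- ===== CLAIM (what is proved, stated in full; the proofs are below) =====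
def Claim_equal_isMirrored : Prop := ∀ (string : String), Dom_isMirrored string → Spec_isMirrored string (isMirrored string)

-- ===== LEMMAS AND PROOFS =====

-- B's match table agrees with A's dict, entrywise
theorem pvMir_of_get? (a b : Char) (h : pvMirror.get? a = some b) : pvMir a = some b := by
  have ha := PySem.Dict.mem_items_of_get?_eq_some pvMirror h
  fin_cases ha <;> rfl

theorem get?_of_pvMir (a b : Char) (h : pvMir a = some b) : pvMirror.get? a = some b := by
  unfold pvMir at h
  split at h <;> cases h <;> rfl

theorem pvMir_eq_get? (a : Char) : pvMir a = pvMirror.get? a := by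
  cases h : pvMirror.get? a with
  | some b => exact pvMir_of_get? a b h
  | none =>
    cases h2 : pvMir a with
    | none => rfl
    | some b => rw [get?_of_pvMir a b h2] at h; cases h

-- the mirror table is symmetric: every (k, v) entry has a matching (v, k) entry
theorem pvMirror_items_symm : ∀ p ∈ pvMirror.items, pvMirror.get? p.2 = some p.1 := by
  intro p hp; fin_cases hp <;> rfl

theorem pvMirror_symm (a b : Char) (h : pvMirror.get? a = some b) :
    pvMirror.get? b = some a :=
  pvMirror_items_symm (a, b) (PySem.Dict.mem_items_of_get?_eq_some pvMirror h)

-- the built image is never longer than the input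
theorem pvFlat_len_le (t : List Char) :
    (t.flatMap (fun c => (pvMir c).toList)).length ≤ t.length := by
  induction t with
  | nil => simp
  | cons c t ih =>
    cases h : pvMir c <;>
      simp only [List.flatMap_cons, h, Option.toList_none, Option.toList_some,
        List.nil_append, List.singleton_append, List.length_cons] <;> omega

-- characterisation of B's built image compared with a same-length string, pointwise
theorem pvFlat_eq_iff (t : List Char) : ∀ (s : List Char), (hl : t.length = s.length) →
    ((t.flatMap (fun c => (pvMir c).toList) = s) ↔
      ∀ k (hk : k < s.length), pvMir (t[k]'(by omega)) = some (s[k]'hk)) := by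
  induction t with
  | nil =>
    intro s hl
    cases s with
    | nil => simp
    | cons a s' => simp at hl
  | cons c t ih =>
    intro s hl
    cases s with
    | nil => simp at hl
    | cons a s' =>
      have hl' : t.length = s'.length := by simpa using hl
      cases hget : pvMir c with
      | none =>
        simp only [List.flatMap_cons, hget, Option.toList_none, List.nil_append]
        constructor
        · intro he
          exfalso
          have h1 := congrArg List.length he
          have h2 := pvFlat_len_le t
          simp only [List.length_cons] at h1
          omega
        · intro hall
          exfalso
          have h0 := hall 0 (by simp)
          simp [hget] at h0
      | some m =>
        simp only [List.flatMap_cons, hget, Option.toList_some, List.singleton_append,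
          List.cons_eq_cons]
        rw [ih s' hl']
        constructor
        · rintro ⟨rfl, hrest⟩ k hk
          cases k with
          | zero => simpa using hget
          | succ k' => simpa using hrest k' (by simpa using hk)
        · intro hall
          refine ⟨?_, ?_⟩
          · have h0 := hall 0 (by simp)
            simp [hget] at h0
            exact h0
          · intro k hk
            simpa using hall (k + 1) (by simpa using hk)

-- the "first half" condition the two-pointer loop checks
def PvHalf (s : List Char) : Prop :=
  ∀ k : Nat, (h2 : 2 * k < s.length) →
    pvMirror.get? (s[s.length - 1 - k]'(by omega)) = some (s[k]'(by omega))

-- the full pointwise condition (every position, not just the first half)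
def PvFull (s : List Char) : Prop :=
  ∀ k : Nat, (hk : k < s.length) →
    pvMirror.get? (s[s.length - 1 - k]'(by omega)) = some (s[k]'hk)

-- by symmetry of the mirror table, checking the first half suffices
theorem pvHalf_iff_full (s : List Char) : PvHalf s ↔ PvFull s := by
  constructor
  · intro hh k hk
    by_cases hcase : 2 * k < s.length
    · exact hh k hcase
    · have hk' : 2 * (s.length - 1 - k) < s.length := by omega
      have h := hh (s.length - 1 - k) hk'
      have hidx : s.length - 1 - (s.length - 1 - k) = k := by omega
      simp only [hidx] at h
      exact pvMirror_symm _ _ h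
  · intro hf k h2
    exact hf k (by omega)

-- the loop is equivalent to the bounded pointwise condition (pure, any i j)
theorem pvLoopA_iff (s : List Char) :
    ∀ (m : Nat) (i j : Int), (j + 1 - i).toNat = m →
    (pvLoopA s i j = true ↔
      ∀ k : Int, i ≤ k → 2 * k ≤ i + j →
        PySem.List.pyGet? s k =
          (PySem.List.pyGet? s (i + j - k)).bind (fun c => pvMirror.get? c)) := by
  intro m
  induction m using Nat.strong_induction_on with
  | _ m ih =>
    intro i j hm
    rw [pvLoopA]
    by_cases hij : i ≤ j
    · rw [dif_pos hij]
      by_cases hc : PySem.List.pyGet? s i =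
          (PySem.List.pyGet? s j).bind (fun c => pvMirror.get? c)
      · rw [if_pos hc]
        rw [ih ((j - 1) + 1 - (i + 1)).toNat (by omega) (i + 1) (j - 1) rfl]
        constructor
        · intro h' k hk1 hk2
          rcases eq_or_lt_of_le hk1 with heq | hlt
          · subst heq; rw [show i + j - i = j from by ring]; exact hc
          · have := h' k (by omega) (by omega)
            rw [show i + 1 + (j - 1) = i + j from by ring] at this
            exact this
        · intro h' k hk1 hk2
          rw [show i + 1 + (j - 1) = i + j from by ring]
          exact h' k (by omega) (by omega)
      · rw [if_neg hc]
        constructor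
        · intro h; exact absurd h (by simp)
        · intro hall
          exfalso
          have h0 := hall i le_rfl (by omega)
          rw [show i + j - i = j from by ring] at h0
          exact hc h0
    · rw [dif_neg hij]
      exact ⟨fun _ k hk1 hk2 => absurd hk2 (by omega), fun _ => rfl⟩

-- bridge: the loop's Int-indexed condition at (0, n-1) is PvHalf
theorem pvA_iff (s : List Char) : (pvLoopA s 0 ((s.length : Int) - 1) = true) ↔ PvHalf s := by
  rw [pvLoopA_iff s ((s.length : Int) - 1 + 1 - 0).toNat 0 ((s.length : Int) - 1) rfl]
  constructor
  · intro h k h2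
    have hk : (0 : Int) ≤ (k : Int) := by omega
    have hb : 2 * (k : Int) ≤ 0 + ((s.length : Int) - 1) := by omega
    have h0 := h (k : Int) hk hb
    have hidx : (0 : Int) + ((s.length : Int) - 1) - (k : Int) = ((s.length - 1 - k : Nat) : Int) := by omega
    rw [hidx, PySem.List.pyGet?_natCast, PySem.List.pyGet?_natCast] at h0
    rw [List.getElem?_eq_getElem (by omega), List.getElem?_eq_getElem (by omega)] at h0
    simp only [Option.bind_some] at h0
    exact h0.symm
  · intro h k hk1 hk2
    lift k to Nat using hk1 with m
    have h2 : 2 * m < s.length := by omega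
    have h0 := h m h2
    have hidx : (0 : Int) + ((s.length : Int) - 1) - (m : Int) = ((s.length - 1 - m : Nat) : Int) := by omega
    rw [hidx, PySem.List.pyGet?_natCast, PySem.List.pyGet?_natCast]
    rw [List.getElem?_eq_getElem (by omega), List.getElem?_eq_getElem (by omega)]
    simp only [Option.bind_some]
    exact h0.symm

-- bridge: B's reversed-image comparison is PvFull
theorem pvB_iff (s : List Char) :
    ((s.flatMap (fun c => (pvMir c).toList)).reverse = s) ↔ PvFull s := by
  rw [List.reverse_eq_iff]
  rw [pvFlat_eq_iff s s.reverse (by simp)]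
  constructor
  · intro hC k hk
    have hk2 : s.length - 1 - k < s.reverse.length := by simp; omega
    have h0 := hC (s.length - 1 - k) hk2
    rw [pvMir_eq_get?, List.getElem_reverse] at h0
    simp only [show s.length - 1 - (s.length - 1 - k) = k from by omega] at h0
    exact h0
  · intro hF k hk
    have hk' : k < s.length := by simpa using hk
    rw [pvMir_eq_get?, List.getElem_reverse]
    have h0 := hF (s.length - 1 - k) (by omega)
    simp only [show s.length - 1 - (s.length - 1 - k) = k from by omega] at h0
    exact h0

-- ===== VERDICT (by name: the statement is the Claim_ definition above) =====
theorem isMirrored_spec : Claim_equal_isMirrored := by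
  intro string _
  unfold Spec_isMirrored isMirrored isMirrored_alt
  have hlen : PySem.Str.len string = (string.toList.length : Int) := by
    simp [PySem.Str.len_eq]
  rw [hlen]
  rw [Bool.eq_iff_iff]
  rw [pvA_iff string.toList, pvHalf_iff_full]
  simp only [decide_eq_true_iff]
  rw [pvB_iff]
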